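-- pv_equiv track=rewrite | github.com/mrorigo/pytorch-researcher | pytorch_researcher/src/memory/manual_memory_manager.py | format_memory_context_for_llm
-- ===== SOURCE A (Python) =====
-- from typing import Any
--
-- def format_memory_context_for_llm(memory_context: list[dict[str, Any]]) -> str:
--     """Format memory context for LLM consumption.
--
--     Args:
--         memory_context: List of memory context items
--
--     Returns:
--         Formatted context string for LLM system prompt
--
--     """
--     if not memory_context:
--         return ""
--
--     prompt = "=== RELEVANT RESEARCH INSIGHTS ===\n"
--     prompt += "Use these insights to inform your decisions:\n\n"
--
--     # Prioritize essential memories and organize by category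
--     essential_memories = []
--     regular_memories = []
--
--     for context_item in memory_context:
--         category = context_item.get("category_primary", "")
--         if category.startswith("essential_"):
--             essential_memories.append(context_item)
--         else:
--             regular_memories.append(context_item)
--
--     # Add essential memories first (higher priority)
--     for context_item in essential_memories:
--         category = context_item.get("category_primary", "research")
--         content = context_item.get("searchable_content", "") or context_item.get("summary", "")
--         prompt += f"[{category.upper()}] {content}\n"
--
--     # Add regular memories
--     for context_item in regular_memories:
--         category = context_item.get("category_primary", "research")
--         content = context_item.get("searchable_content", "") or context_item.get("summary", "")
--         prompt += f"- [{category}] {content}\n"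
--
--     prompt += "\n=== END RESEARCH INSIGHTS ===\n"
--     return prompt
-- ===== SOURCE B (Python) =====
-- def format_memory_context_for_llm(memory_context: list[dict[str, any]]) -> str:
--     """Single pass: branch each item into an essential or regular string buffer."""
--     if not memory_context:
--         return ""
--     essential_buf = ""
--     regular_buf = ""
--     for item in memory_context:
--         cat0 = item.get("category_primary", "")
--         content = item.get("searchable_content", "") or item.get("summary", "")
--         if cat0.startswith("essential_"):
--             essential_buf += f"[{cat0.upper()}] {content}\n"
--         else:
--             cat = item.get("category_primary", "research")
--             regular_buf += f"- [{cat}] {content}\n"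
--     return (
--         "=== RELEVANT RESEARCH INSIGHTS ===\n"
--         "Use these insights to inform your decisions:\n\n"
--         + essential_buf
--         + regular_buf
--         + "\n=== END RESEARCH INSIGHTS ===\n"
--     )
-- ===== Notes on version B (the rewrite author's own statement) =====
-- stated objective: alternative
-- what changed: Replaced A's partition-into-two-lists-then-two-formatting-passes with a single pass over memory_context that appends each formatted line directly to one of two string buffers (essential/regular), concatenated once at the end.
import Mathlib
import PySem

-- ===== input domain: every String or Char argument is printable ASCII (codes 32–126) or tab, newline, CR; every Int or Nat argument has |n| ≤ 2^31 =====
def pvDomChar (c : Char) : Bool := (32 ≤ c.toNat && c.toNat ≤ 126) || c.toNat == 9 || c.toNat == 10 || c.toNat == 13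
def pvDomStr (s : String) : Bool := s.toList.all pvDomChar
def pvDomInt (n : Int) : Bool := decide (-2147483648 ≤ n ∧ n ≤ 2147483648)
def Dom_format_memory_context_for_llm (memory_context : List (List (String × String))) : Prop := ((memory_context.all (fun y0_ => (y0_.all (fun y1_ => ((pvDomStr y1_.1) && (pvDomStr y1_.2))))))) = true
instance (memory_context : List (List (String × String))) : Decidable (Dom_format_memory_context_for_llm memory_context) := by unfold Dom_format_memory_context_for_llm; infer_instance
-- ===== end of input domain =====

-- B replaces A's partition-into-two-lists-then-two-formatting-passes by a single pass over
-- memory_context maintaining two string buffers (essential / regular); same output, one traversal.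


-- ===== PORT A =====
-- dict.get(k, dflt) on an association list (first match = Python dict lookup; shared dict primitive)
def alGet (d : List (String × String)) (k dflt : String) : String :=
  match d.find? (fun p => p.1 == k) with
  | some p => p.2
  | none => dflt

def format_memory_context_for_llm (memory_context : List (List (String × String))) : String :=
  if memory_context = [] then ""
  else
    let prompt := "=== RELEVANT RESEARCH INSIGHTS ===\n" ++ "Use these insights to inform your decisions:\n\n"
    -- first loop: partition into essential_memories / regular_memories
    let part := memory_context.foldl
      (fun (acc : List (List (String × String)) × List (List (String × String))) context_item =>
        if PySem.Str.startswith (alGet context_item "category_primary" "") "essential_" then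
          (acc.1 ++ [context_item], acc.2)
        else
          (acc.1, acc.2 ++ [context_item])) ([], [])
    -- second loop: essential memories
    let prompt := part.1.foldl
      (fun p context_item =>
        let category := alGet context_item "category_primary" "research"
        let content :=
          let sc := alGet context_item "searchable_content" ""
          if sc ≠ "" then sc else alGet context_item "summary" ""
        p ++ "[" ++ PySem.Str.upper category ++ "] " ++ content ++ "\n") prompt
    -- third loop: regular memories
    let prompt := part.2.foldl
      (fun p context_item =>
        let category := alGet context_item "category_primary" "research"
        let content :=
          let sc := alGet context_item "searchable_content" ""
          if sc ≠ "" then sc else alGet context_item "summary" ""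
        p ++ "- [" ++ category ++ "] " ++ content ++ "\n") prompt
    prompt ++ "\n=== END RESEARCH INSIGHTS ===\n"

-- ===== PORT B =====
def format_memory_context_for_llm_alt (memory_context : List (List (String × String))) : String :=
  if memory_context = [] then ""
  else
    let bufs := memory_context.foldl
      (fun (acc : String × String) item =>
        let cat0 := alGet item "category_primary" ""
        let content :=
          let sc := alGet item "searchable_content" ""
          if sc ≠ "" then sc else alGet item "summary" ""
        if PySem.Str.startswith cat0 "essential_" then
          (acc.1 ++ "[" ++ PySem.Str.upper cat0 ++ "] " ++ content ++ "\n", acc.2)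
        else
          let cat := alGet item "category_primary" "research"
          (acc.1, acc.2 ++ "- [" ++ cat ++ "] " ++ content ++ "\n")) ("", "")
    "=== RELEVANT RESEARCH INSIGHTS ===\n" ++ "Use these insights to inform your decisions:\n\n"
      ++ bufs.1 ++ bufs.2 ++ "\n=== END RESEARCH INSIGHTS ===\n"

-- ===== PRECONDITION & SPEC =====
def Spec_format_memory_context_for_llm (memory_context : List (List (String × String))) (out : String) : Prop := out = format_memory_context_for_llm_alt memory_context
instance (memory_context : List (List (String × String))) (out : String) : Decidable (Spec_format_memory_context_for_llm memory_context out) := by unfold Spec_format_memory_context_for_llm; infer_instance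

-- ===== CLAIM (what is proved, stated in full; the proofs are below) =====
def Claim_equal_format_memory_context_for_llm : Prop := ∀ (memory_context : List (List (String × String))), Dom_format_memory_context_for_llm memory_context → Spec_format_memory_context_for_llm memory_context (format_memory_context_for_llm memory_context)

-- ===== LEMMAS AND PROOFS =====

-- the per-item test and the two per-item lines, as proof-side abbreviations
def pvIsEss (it : List (String × String)) : Bool :=
  PySem.Str.startswith (alGet it "category_primary" "") "essential_"

def pvContent (it : List (String × String)) : String :=
  let sc := alGet it "searchable_content" ""
  if sc ≠ "" then sc else alGet it "summary" ""

def pvELine (it : List (String × String)) : String :=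
  "[" ++ PySem.Str.upper (alGet it "category_primary" "research") ++ "] " ++ pvContent it ++ "\n"

def pvRLine (it : List (String × String)) : String :=
  "- [" ++ alGet it "category_primary" "research" ++ "] " ++ pvContent it ++ "\n"

-- if the essential test fires, the key is present, so the two defaults coincide
theorem alGet_research_of_ess (it : List (String × String))
    (h : pvIsEss it = true) :
    alGet it "category_primary" "research" = alGet it "category_primary" "" := by
  unfold pvIsEss at h
  unfold alGet at *
  cases hf : it.find? (fun p => p.1 == "category_primary") with
  | some p => rfl
  | none =>
    rw [hf] at h
    exact absurd h (by decide)

-- string-appending fold pulls its initial accumulator out front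
theorem foldl_line (f : List (String × String) → String) :
    ∀ (xs : List (List (String × String))) (p : String),
      xs.foldl (fun p it => p ++ f it) p = p ++ xs.foldl (fun p it => p ++ f it) "" := by
  intro xs
  induction xs with
  | nil => intro p; simp [List.foldl]
  | cons x xs ih =>
    intro p
    simp only [List.foldl]
    rw [ih (p ++ f x), ih ("" ++ f x)]
    simp [String.append_assoc]

-- A's partition fold computed as filters
theorem partFold_eq :
    ∀ (xs : List (List (String × String)))
      (l1 l2 : List (List (String × String))),
      xs.foldl
        (fun (acc : List (List (String × String)) × List (List (String × String))) it =>
          if PySem.Str.startswith (alGet it "category_primary" "") "essential_" then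
            (acc.1 ++ [it], acc.2)
          else
            (acc.1, acc.2 ++ [it])) (l1, l2)
        = (l1 ++ xs.filter pvIsEss, l2 ++ xs.filter (fun it => !pvIsEss it)) := by
  intro xs
  induction xs with
  | nil => intro l1 l2; simp
  | cons x xs ih =>
    intro l1 l2
    simp only [List.foldl_cons]
    by_cases h : pvIsEss x = true
    · rw [if_pos (by unfold pvIsEss at h; exact h), ih]
      simp [h]
    · rw [if_neg (by unfold pvIsEss at h; exact h), ih]
      simp only [Bool.not_eq_true] at h
      simp [h]

-- B's single fold computed as the two filtered line-concatenations
theorem bufFold_eq :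
    ∀ (xs : List (List (String × String))) (s1 s2 : String),
      xs.foldl
        (fun (acc : String × String) item =>
          let cat0 := alGet item "category_primary" ""
          let content :=
            let sc := alGet item "searchable_content" ""
            if sc ≠ "" then sc else alGet item "summary" ""
          if PySem.Str.startswith cat0 "essential_" then
            (acc.1 ++ "[" ++ PySem.Str.upper cat0 ++ "] " ++ content ++ "\n", acc.2)
          else
            let cat := alGet item "category_primary" "research"
            (acc.1, acc.2 ++ "- [" ++ cat ++ "] " ++ content ++ "\n")) (s1, s2)
        = (s1 ++ (xs.filter pvIsEss).foldl (fun p it => p ++ pvELine it) "",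
           s2 ++ (xs.filter (fun it => !pvIsEss it)).foldl (fun p it => p ++ pvRLine it) "") := by
  intro xs
  induction xs with
  | nil => intro s1 s2; simp
  | cons x xs ih =>
    intro s1 s2
    simp only [List.foldl_cons]
    by_cases h : pvIsEss x = true
    · rw [if_pos (by unfold pvIsEss at h; exact h), ih]
      have hl : pvELine x =
          "[" ++ PySem.Str.upper (alGet x "category_primary" "") ++ "] " ++ pvContent x ++ "\n" := by
        unfold pvELine
        rw [alGet_research_of_ess x h]
      rw [List.filter_cons_of_pos h, List.filter_cons_of_neg (by simp [h]), List.foldl_cons]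
      rw [foldl_line pvELine (xs.filter pvIsEss) ("" ++ pvELine x)]
      simp [hl, pvContent, String.append_assoc]
    · rw [if_neg (by unfold pvIsEss at h; exact h), ih]
      rw [List.filter_cons_of_neg (by simpa using h), List.filter_cons_of_pos (by simp [h]),
        List.foldl_cons]
      rw [foldl_line pvRLine (xs.filter (fun it => !pvIsEss it)) ("" ++ pvRLine x)]
      simp [pvRLine, pvContent, String.append_assoc]

-- ===== VERDICT (by name: the statement is the Claim_ definition above) =====
theorem format_memory_context_for_llm_spec : Claim_equal_format_memory_context_for_llm := by
  unfold Claim_equal_format_memory_context_for_llm Spec_format_memory_context_for_llm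
  intro mc _
  unfold format_memory_context_for_llm format_memory_context_for_llm_alt
  by_cases hmc : mc = []
  · simp [hmc]
  · rw [if_neg hmc, if_neg hmc]
    rw [partFold_eq mc [] [], bufFold_eq mc "" ""]
    simp only [List.nil_append]
    have hE : (fun (p : String) (context_item : List (String × String)) =>
        p ++ "[" ++ PySem.Str.upper (alGet context_item "category_primary" "research") ++ "] " ++
          (let sc := alGet context_item "searchable_content" ""
           if sc ≠ "" then sc else alGet context_item "summary" "") ++ "\n")
        = (fun (p : String) it => p ++ pvELine it) := by
      funext p it
      simp [pvELine, pvContent, String.append_assoc]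
    have hR : (fun (p : String) (context_item : List (String × String)) =>
        p ++ "- [" ++ alGet context_item "category_primary" "research" ++ "] " ++
          (let sc := alGet context_item "searchable_content" ""
           if sc ≠ "" then sc else alGet context_item "summary" "") ++ "\n")
        = (fun (p : String) it => p ++ pvRLine it) := by
      funext p it
      simp [pvRLine, pvContent, String.append_assoc]
    rw [hE, hR]
    rw [foldl_line pvELine (mc.filter pvIsEss)]
    rw [foldl_line pvRLine (mc.filter (fun it => !pvIsEss it))]
    simp [String.append_assoc]
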